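-- pv_equiv track=rewrite | github.com/Kesendo/R-equals-C-Psi-squared | simulations/_f89_path_d_structure_probe.py | v2
-- ===== SOURCE A (Python) =====
-- def v2(n: int) -> int:
--     """2-adic valuation of n (v2(0) defined as 0)."""
--     if n <= 0:
--         return 0
--     v = 0
--     while n % 2 == 0:
--         n //= 2
--         v += 1
--     return v
-- ===== SOURCE B (Python) =====
-- def v2(n: int) -> int:
--     """2-adic valuation of n (v2(0) defined as 0)."""
--     if n <= 0:
--         return 0
--     return (n & -n).bit_length() - 1
-- ===== Notes on version B (the rewrite author's own statement) =====
-- stated objective: idiomatic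
-- what changed: Replaces the repeated-division loop by the closed-form bit trick (n & -n).bit_length() - 1, which isolates the lowest set bit and reads off its exponent.
import Mathlib
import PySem

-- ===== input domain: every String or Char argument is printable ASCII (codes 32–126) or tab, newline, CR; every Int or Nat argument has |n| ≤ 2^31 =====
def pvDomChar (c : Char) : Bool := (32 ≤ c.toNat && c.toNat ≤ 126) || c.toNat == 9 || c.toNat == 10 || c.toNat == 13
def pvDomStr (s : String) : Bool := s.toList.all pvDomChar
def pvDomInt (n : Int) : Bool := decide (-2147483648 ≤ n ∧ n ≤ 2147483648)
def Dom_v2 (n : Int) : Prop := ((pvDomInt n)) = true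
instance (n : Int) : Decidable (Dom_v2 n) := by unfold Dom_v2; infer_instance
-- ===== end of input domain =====

-- B replaces A's repeated-halving loop by the closed-form bit trick (n & -n).bit_length() - 1 (idiomatic, no loop).

-- ===== PORT A =====
-- A's while-loop; the '0 < n' conjunct is only a termination guard: the loop is
-- entered with n > 0 and halving an even positive n keeps it positive.
def v2Loop (n : Int) (v : Int) : Int :=
  if h : 0 < n ∧ PySem.Int.mod n 2 = 0 then
    v2Loop (PySem.Int.floordiv n 2) (v + 1)
  else v
termination_by n.toNat
decreasing_by
  obtain ⟨hn, hm⟩ := h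
  obtain ⟨k, hk⟩ := (PySem.Int.mod_eq_zero_iff_dvd n 2).1 hm
  rw [PySem.Int.floordiv_eq_ediv_of_pos (by omega : (0:Int) < 2), hk,
    Int.mul_ediv_cancel_left _ (by omega : (2:Int) ≠ 0)]
  omega

def v2 (n : Int) : Int :=
  if n ≤ 0 then 0 else v2Loop n 0

-- ===== PORT B =====
def v2_alt (n : Int) : Int :=
  if n ≤ 0 then 0
  else (PySem.Int.bitLength (PySem.Int.band n (-n)) : Int) - 1

-- ===== PRECONDITION & SPEC =====
def Spec_v2 (n : Int) (out : Int) : Prop := out = v2_alt n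
instance (n : Int) (out : Int) : Decidable (Spec_v2 n out) := by unfold Spec_v2; infer_instance

-- ===== CLAIM (what is proved, stated in full; the proofs are below) =====
def Claim_equal_v2 : Prop := ∀ (n : Int), Dom_v2 n → Spec_v2 n (v2 n)

-- ===== LEMMAS AND PROOFS =====

-- Python's n & -n for positive n, written through the Nat computation PySem.Int.band performs.
lemma band_neg_self (n : Int) (hn : 0 < n) :
    PySem.Int.band n (-n) = ((n.toNat - (n.toNat &&& (n.toNat - 1)) : ℕ) : Int) := by
  have h1 : (0:Int) ≤ n := le_of_lt hn
  have h2 : ¬ (0:Int) ≤ -n := by omega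
  simp only [PySem.Int.band, if_pos h1, if_neg h2]
  have h3 : (- -n - 1).toNat = n.toNat - 1 := by omega
  rw [h3]

-- odd N: N &&& (N-1) = N - 1
lemma land_pred_odd (M : ℕ) : (2*M+1) &&& (2*M) = 2*M := by
  have := Nat.land_bit true M false M
  simpa [Nat.bit_val, Nat.and_self] using this

-- even N = 2K (K ≥ 1): N &&& (N-1) = 2*(K &&& (K-1))
lemma land_pred_even (K : ℕ) (hK : 0 < K) : (2*K) &&& (2*K-1) = 2*(K &&& (K-1)) := by
  have := Nat.land_bit false K true (K-1)
  have h : 2*(K-1)+1 = 2*K-1 := by omega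
  simpa [Nat.bit_val, h] using this

lemma band_pow (e M : ℕ) :
    PySem.Int.band ((2^e*(2*M+1) : ℕ) : Int) (-((2^e*(2*M+1) : ℕ) : Int)) = ((2^e : ℕ) : Int) := by
  induction e with
  | zero =>
    rw [band_neg_self _ (by positivity)]
    simp only [Int.toNat_natCast]
    norm_num [land_pred_odd]
  | succ e ih =>
    have hpos : 0 < 2^e*(2*M+1) := by positivity
    rw [band_neg_self _ (by exact_mod_cast (show 0 < 2^(e+1)*(2*M+1) by positivity))]
    rw [band_neg_self _ (by exact_mod_cast hpos)] at ih
    simp only [Int.toNat_natCast] at ih ⊢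
    have h2 : 2^(e+1)*(2*M+1) = 2*(2^e*(2*M+1)) := by ring
    rw [h2, land_pred_even _ hpos]
    have hle : (2^e*(2*M+1)) &&& (2^e*(2*M+1) - 1) ≤ 2^e*(2*M+1) := Nat.and_le_left
    have : (2^e*(2*M+1)) - ((2^e*(2*M+1)) &&& (2^e*(2*M+1) - 1)) = 2^e := by
      exact_mod_cast ih
    rw [show 2*(2^e*(2*M+1)) - 2*((2^e*(2*M+1)) &&& (2^e*(2*M+1) - 1)) = 2*(2^e*(2*M+1) - ((2^e*(2*M+1)) &&& (2^e*(2*M+1) - 1))) by omega, this]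
    push_cast [pow_succ]
    ring

lemma bitLength_pow (e : ℕ) : PySem.Int.bitLength ((2^e : ℕ) : Int) = e + 1 := by
  induction e with
  | zero => decide
  | succ e ih =>
    rw [PySem.Int.bitLength_natCast (by positivity)]
    have h : 2^(e+1)/2 = 2^e := by
      rw [pow_succ, Nat.mul_div_cancel _ (by omega)]
    rw [h, ih]

lemma loop_pow (e M : ℕ) (v : Int) :
    v2Loop ((2^e*(2*M+1) : ℕ) : Int) v = v + e := by
  induction e generalizing v with
  | zero =>
    rw [v2Loop]
    rw [dif_neg]
    · simp
    · rintro ⟨-, hm⟩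
      rw [PySem.Int.mod_eq_emod_of_pos (by omega)] at hm
      push_cast at hm
      omega
  | succ e ih =>
    rw [v2Loop, dif_pos]
    · have hd : PySem.Int.floordiv ((2^(e+1)*(2*M+1) : ℕ) : Int) 2 = ((2^e*(2*M+1) : ℕ) : Int) := by
        rw [PySem.Int.floordiv_eq_ediv_of_pos (by omega)]
        push_cast [pow_succ]
        rw [show ((2:Int)^e*2*(2*M+1)) = 2*((2:Int)^e*(2*M+1)) by ring,
          Int.mul_ediv_cancel_left _ (by omega)]
      rw [hd, ih]
      push_cast
      ring
    · constructor
      · exact_mod_cast (show 0 < 2^(e+1)*(2*M+1) by positivity)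
      · rw [PySem.Int.mod_eq_emod_of_pos (by omega)]
        push_cast [pow_succ]
        rw [show ((2:Int)^e*2*(2*M+1)) = 2*((2:Int)^e*(2*M+1)) by ring]
        omega

-- ===== VERDICT (by name: the statement is the Claim_ definition above) =====
theorem v2_spec : Claim_equal_v2 := by
  intro n _
  unfold Spec_v2 v2 v2_alt
  by_cases hn : n ≤ 0
  · simp [hn]
  · simp only [if_neg hn]
    have hpos : 0 < n := by omega
    obtain ⟨k, m, hodd, hm⟩ := Nat.exists_eq_two_pow_mul_odd (n := n.toNat) (by omega)
    obtain ⟨M, hM⟩ := hodd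
    have hrep : n = ((2^k*(2*M+1) : ℕ) : Int) := by
      rw [show 2*M+1 = m by omega, ← hm]
      omega
    rw [hrep, loop_pow, band_pow, bitLength_pow]
    omega
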